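-- pv_equiv track=rewrite | github.com/BogaertN/echo-forge | agents/opponent.py | _identify_quick_weaknesses
-- ===== SOURCE A (Python) =====
-- from typing import Dict, List, Optional, Any, Tuple
--
-- def _identify_quick_weaknesses(argument: str) -> List[str]:
--     """Quick identification of argument weaknesses"""
--     weaknesses = []
--     argument_lower = argument.lower()
--
--     if any(word in argument_lower for word in ["all", "every", "never", "always"]):
--         weaknesses.append("overgeneralization")
--
--     if "because" in argument_lower and not any(evidence in argument_lower for evidence in ["study", "data", "research"]):
--         weaknesses.append("unsupported_causation")
--
--     if any(word in argument_lower for word in ["feel", "believe"]) and not any(fact in argument_lower for fact in ["fact", "evidence", "data"]):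
--         weaknesses.append("opinion_over_fact")
--
--     return weaknesses
-- ===== SOURCE B (Python) =====
-- from typing import List
--
-- _KEYWORDS = ("all", "every", "never", "always", "because", "study", "data",
--              "research", "feel", "believe", "fact", "evidence")
--
-- def _identify_quick_weaknesses(argument: str) -> List[str]:
--     """Single left-to-right scan: one multi-pattern pass records which of the
--     twelve keywords occur, then the three labels are derived from those flags."""
--     low = argument.lower()
--     pending = set(_KEYWORDS)
--     found = set()
--     for i in range(len(low)):
--         if not pending:
--             break
--         hit = {kw for kw in pending if low.startswith(kw, i)}
--         found |= hit
--         pending -= hit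
--     out = []
--     if found & {"all", "every", "never", "always"}:
--         out.append("overgeneralization")
--     if "because" in found and not found & {"study", "data", "research"}:
--         out.append("unsupported_causation")
--     if found & {"feel", "believe"} and not found & {"fact", "evidence", "data"}:
--         out.append("opinion_over_fact")
--     return out
-- ===== Notes on version B (the rewrite author's own statement) =====
-- stated objective: alternative
-- what changed: Instead of A's twelve independent whole-string substring searches, B makes one left-to-right multi-pattern scan over the lowercased string that records which keywords start at each position (removing matched keywords from a pending set, stopping early once all are found), and then derives the three labels from those recorded flags; it trades speed for a single traversal.
import Mathlib
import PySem

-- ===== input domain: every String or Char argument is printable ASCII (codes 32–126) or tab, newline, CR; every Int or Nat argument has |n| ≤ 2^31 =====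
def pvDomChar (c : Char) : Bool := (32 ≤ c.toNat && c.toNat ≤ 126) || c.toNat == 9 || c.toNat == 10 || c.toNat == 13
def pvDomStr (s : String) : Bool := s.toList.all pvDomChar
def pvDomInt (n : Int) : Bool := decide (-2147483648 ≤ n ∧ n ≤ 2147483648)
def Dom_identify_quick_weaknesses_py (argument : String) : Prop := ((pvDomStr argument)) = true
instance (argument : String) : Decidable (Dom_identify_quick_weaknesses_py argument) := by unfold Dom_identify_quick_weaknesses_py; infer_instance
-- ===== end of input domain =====

-- B replaces A's twelve independent substring searches by one left-to-right scan that records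
-- which keywords occur and then derives the labels from those flags (objective: alternative).


-- ===== PORT A =====
def identify_quick_weaknesses_py (argument : String) : List String :=
  let weaknesses : List String := []
  let argument_lower := PySem.Str.lower argument
  let weaknesses :=
    if ["all", "every", "never", "always"].any (fun word => PySem.Str.isIn word argument_lower) then
      weaknesses ++ ["overgeneralization"]
    else weaknesses
  let weaknesses :=
    if PySem.Str.isIn "because" argument_lower &&
       !(["study", "data", "research"].any (fun evidence => PySem.Str.isIn evidence argument_lower)) then
      weaknesses ++ ["unsupported_causation"]
    else weaknesses
  let weaknesses :=
    if (["feel", "believe"].any (fun word => PySem.Str.isIn word argument_lower)) &&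
       !(["fact", "evidence", "data"].any (fun fact => PySem.Str.isIn fact argument_lower)) then
      weaknesses ++ ["opinion_over_fact"]
    else weaknesses
  weaknesses

-- ===== PORT B =====
-- the twelve keywords B scans for
def pvKeywords : List String :=
  ["all", "every", "never", "always", "because", "study", "data",
   "research", "feel", "believe", "fact", "evidence"]

-- the scanning loop of Source B: walk the suffixes of the lowercased text; at each position move the
-- keywords that start here from `pending` to `found`; stop early when `pending` is empty.
def pvScan (pending found : List String) (l : List Char) : List String :=
  match l with
  | [] => found
  | c :: t =>
    if pending.isEmpty then found
    else
      let hit := pending.filter (fun kw => kw.toList.isPrefixOf (c :: t))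
      pvScan (pending.filter (fun kw => !kw.toList.isPrefixOf (c :: t))) (found ++ hit) t

def identify_quick_weaknesses_py_alt (argument : String) : List String :=
  let low := PySem.Str.lower argument
  let found := pvScan pvKeywords [] low.toList
  let has := fun (kw : String) => decide (kw ∈ found)
  let out : List String := []
  let out :=
    if has "all" || has "every" || has "never" || has "always" then
      out ++ ["overgeneralization"]
    else out
  let out :=
    if has "because" && !(has "study" || has "data" || has "research") then
      out ++ ["unsupported_causation"]
    else out
  let out :=
    if (has "feel" || has "believe") && !(has "fact" || has "evidence" || has "data") then
      out ++ ["opinion_over_fact"]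
    else out
  out

-- ===== PRECONDITION & SPEC =====
def Spec_identify_quick_weaknesses_py (argument : String) (out : List String) : Prop := out = identify_quick_weaknesses_py_alt argument
instance (argument : String) (out : List String) : Decidable (Spec_identify_quick_weaknesses_py argument out) := by unfold Spec_identify_quick_weaknesses_py; infer_instance

-- ===== CLAIM =====
def Claim_equal_identify_quick_weaknesses_py : Prop := ∀ (argument : String), Dom_identify_quick_weaknesses_py argument → Spec_identify_quick_weaknesses_py argument (identify_quick_weaknesses_py argument)

-- ===== LEMMAS AND PROOFS =====

-- what the scan finds: exactly the pending keywords that are infixes (given all keywords nonempty)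
theorem mem_pvScan (a : String) (l : List Char) : ∀ (pending found : List String),
    (∀ k ∈ pending, k.toList ≠ []) →
    (a ∈ pvScan pending found l ↔ a ∈ found ∨ (a ∈ pending ∧ a.toList <:+: l)) := by
  induction l with
  | nil =>
    intro pending found hne
    simp only [pvScan, List.infix_nil]
    constructor
    · exact Or.inl
    · rintro (h | ⟨hp, he⟩)
      · exact h
      · exact absurd he (hne a hp)
  | cons c t ih =>
    intro pending found hne
    simp only [pvScan]
    by_cases hp : pending.isEmpty
    · rw [if_pos hp]
      rw [List.isEmpty_iff] at hp
      subst hp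
      simp
    · rw [if_neg hp]
      rw [ih _ _ (fun k hk => hne k (List.mem_of_mem_filter hk))]
      by_cases hpre : a.toList <+: c :: t <;>
        simp [List.mem_filter, List.isPrefixOf_iff_prefix, List.infix_cons_iff, hpre,
          Bool.eq_false_iff]

-- membership in the scan result over the full keyword list equals Python's `kw in low`
theorem has_eq (low kw : String) (h1 : kw ∈ pvKeywords) :
    decide (kw ∈ pvScan pvKeywords [] low.toList) = PySem.Str.isIn kw low := by
  have hne : ∀ k ∈ pvKeywords, k.toList ≠ [] := by decide
  have hiff : kw ∈ pvScan pvKeywords [] low.toList ↔ PySem.Str.isIn kw low = true := by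
    rw [mem_pvScan kw low.toList pvKeywords [] hne, PySem.Str.isIn_iff_infix]
    simp [h1]
  cases hb : PySem.Str.isIn kw low <;> simp_all

-- ===== VERDICT =====
theorem identify_quick_weaknesses_py_spec : Claim_equal_identify_quick_weaknesses_py := by
  intro argument _
  unfold Spec_identify_quick_weaknesses_py identify_quick_weaknesses_py identify_quick_weaknesses_py_alt
  simp only [List.any_cons, List.any_nil, Bool.or_false]
  simp only [has_eq (PySem.Str.lower argument) "all" (by decide),
     has_eq (PySem.Str.lower argument) "every" (by decide),
     has_eq (PySem.Str.lower argument) "never" (by decide),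
     has_eq (PySem.Str.lower argument) "always" (by decide),
     has_eq (PySem.Str.lower argument) "because" (by decide),
     has_eq (PySem.Str.lower argument) "study" (by decide),
     has_eq (PySem.Str.lower argument) "data" (by decide),
     has_eq (PySem.Str.lower argument) "research" (by decide),
     has_eq (PySem.Str.lower argument) "feel" (by decide),
     has_eq (PySem.Str.lower argument) "believe" (by decide),
     has_eq (PySem.Str.lower argument) "fact" (by decide),
     has_eq (PySem.Str.lower argument) "evidence" (by decide)]
  simp [Bool.or_assoc]
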